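-- pv_equiv track=rewrite | github.com/notoraptor/pysaurus | pysaurus/wip/pillow_wip.py | refine_pixel
-- ===== SOURCE A (Python) =====
-- def refine_pixel(pixel, pixels_around):
--     local_colors = {pixel: 1}
--     for other_pixel in pixels_around:
--         local_colors.setdefault(other_pixel, 0)
--         local_colors[other_pixel] += 1
--     max_colors = []
--     max_count = None
--     for color, count in local_colors.items():
--         if max_count is None or max_count < count:
--             max_count = count
--             max_colors.clear()
--             max_colors.append(color)
--         elif max_count == count:
--             max_colors.append(color)
--     if pixel in max_colors:
--         output_pixel = pixel
--         nb_refined = 0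
--     elif len(max_colors) == 1:
--         output_pixel = max_colors[0]
--         nb_refined = 1
--     else:
--         output_pixel = sorted(max_colors)[0]
--         nb_refined = 1
--     return output_pixel, nb_refined
-- ===== SOURCE B (Python) =====
-- def refine_pixel(pixel, pixels_around):
--     # Sort the full multiset (center included); equal colors become contiguous runs.
--     xs = sorted(pixels_around + [pixel])
--     best_color = xs[0]
--     best_run = 0
--     center_run = 0
--     i = 0
--     n = len(xs)
--     while i < n:
--         j = i + 1
--         while j < n and xs[j] == xs[i]:
--             j += 1
--         run = j - i
--         if xs[i] == pixel:
--             center_run = run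
--         if run > best_run:
--             best_color = xs[i]
--             best_run = run
--         i = j
--     # strict '>' on an ascending scan makes best_color the smallest color with a maximal run
--     if center_run == best_run:
--         return pixel, 0
--     return best_color, 1
-- ===== Notes on version B (the rewrite author's own statement) =====
-- stated objective: alternative
-- what changed: Replaces A's dict-of-counts plus argmax tie-list with a sort of the full multiset (center included) followed by a single run-length scan: the longest run is the max count and, because the scan is ascending with a strict '>' update, the recorded color is automatically the smallest tied maximum; the center's own run length is picked up in the same scan.
import Mathlib
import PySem

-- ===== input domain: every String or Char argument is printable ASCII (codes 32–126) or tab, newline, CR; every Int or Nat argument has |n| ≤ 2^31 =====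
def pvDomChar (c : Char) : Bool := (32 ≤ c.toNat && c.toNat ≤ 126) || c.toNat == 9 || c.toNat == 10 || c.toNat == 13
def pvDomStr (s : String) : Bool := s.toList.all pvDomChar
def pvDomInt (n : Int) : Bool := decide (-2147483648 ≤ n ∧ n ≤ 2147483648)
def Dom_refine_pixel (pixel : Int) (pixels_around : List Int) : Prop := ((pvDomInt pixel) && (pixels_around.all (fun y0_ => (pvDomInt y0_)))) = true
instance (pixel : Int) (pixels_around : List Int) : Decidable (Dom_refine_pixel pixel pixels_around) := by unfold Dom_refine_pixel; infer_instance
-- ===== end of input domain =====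

-- B replaces A's dict-of-counts + argmax tie-list by sorting the full multiset (center included)
-- and a single run-length scan over the sorted list (objective: alternative algorithm, similar cost).


-- ===== PORT A =====
-- A's second loop body (max_count None / < / == cases), as a named step function
def pvStepA (st : List Int × Option Int) (cc : Int × Int) : List Int × Option Int :=
  match st.2 with
  | none => ([cc.1], some cc.2)
  | some m =>
    if m < cc.2 then ([cc.1], some cc.2)
    else if m = cc.2 then (st.1 ++ [cc.1], some m)
    else st

def refine_pixel (pixel : Int) (pixels_around : List Int) : Int × Int :=
  -- local_colors = {pixel: 1}; setdefault then 'local_colors[p] += 1' (= modify with the key now present)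
  let local_colors : PySem.Dict Int Int :=
    pixels_around.foldl (fun d other_pixel => (d.setdefault other_pixel 0).modify other_pixel 0 (· + 1))
      (PySem.Dict.mk [(pixel, 1)])
  let st := local_colors.items.foldl pvStepA ([], none)
  let max_colors := st.1
  if pixel ∈ max_colors then (pixel, 0)
  else if max_colors.length = 1 then
    ((PySem.List.pyGet? max_colors 0).getD 0, 1)   -- max_colors[0]: index 0 of a nonempty list, never none
  else
    ((PySem.List.pyGet? (PySem.List.sorted max_colors (fun x => x) false) 0).getD 0, 1)  -- sorted(max_colors)[0]

-- ===== PORT B =====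
-- inner 'while j < n and xs[j] == xs[i]' : count the run of xs[i] and return the remainder
def pvTakeRun (v : Int) : List Int → Nat × List Int
  | [] => (0, [])
  | y :: t => if y = v then ((pvTakeRun v t).1 + 1, (pvTakeRun v t).2) else (0, y :: t)

-- termination fact for the outer loop: the remainder is no longer than the scanned tail
lemma pvTakeRun_length (v : Int) : ∀ t : List Int, (pvTakeRun v t).2.length ≤ t.length := by
  intro t
  induction t with
  | nil => simp [pvTakeRun]
  | cons y t ih =>
      by_cases h : y = v
      · simp only [pvTakeRun, if_pos h]
        exact Nat.le_succ_of_le ih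
      · simp [pvTakeRun, if_neg h]

-- outer 'while i < n' loop over the sorted list; state = (best_color, best_run, center_run)
def pvScan (pixel : Int) : List Int → Int × Int × Int → Int × Int × Int
  | [], st => st
  | x :: t, (bc, br, cr) =>
    let run : Int := ((pvTakeRun x t).1 : Int) + 1
    let cr' := if x = pixel then run else cr
    pvScan pixel (pvTakeRun x t).2 (if br < run then (x, run, cr') else (bc, br, cr'))
termination_by xs _ => xs.length
decreasing_by
  exact Nat.lt_succ_of_le (pvTakeRun_length x t)

def refine_pixel_alt (pixel : Int) (pixels_around : List Int) : Int × Int :=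
  let xs := PySem.List.sorted (pixels_around ++ [pixel]) (fun x => x) false
  let st := pvScan pixel xs ((PySem.List.pyGet? xs 0).getD 0, 0, 0)   -- xs[0]: xs is nonempty, never none
  if st.2.2 = st.2.1 then (pixel, 0) else (st.1, 1)

-- ===== PRECONDITION & SPEC =====
def Spec_refine_pixel (pixel : Int) (pixels_around : List Int) (out : Int × Int) : Prop := out = refine_pixel_alt pixel pixels_around
instance (pixel : Int) (pixels_around : List Int) (out : Int × Int) : Decidable (Spec_refine_pixel pixel pixels_around out) := by unfold Spec_refine_pixel; infer_instance

-- ===== CLAIM (what is proved, stated in full; the proofs are below) =====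
def Claim_equal_refine_pixel : Prop := ∀ (pixel : Int) (pixels_around : List Int), Dom_refine_pixel pixel pixels_around → Spec_refine_pixel pixel pixels_around (refine_pixel pixel pixels_around)

-- ===== LEMMAS AND PROOFS =====

-- the two ways of writing A's count-building step agree
lemma pv_step_eq (d : PySem.Dict Int Int) (p : Int) :
    (d.setdefault p 0).modify p 0 (· + 1) = d.insert p (d.getD p 0 + 1) := by
  by_cases h : d.contains p = true
  · rw [PySem.Dict.setdefault_of_contains d 0 h]
    rfl
  · rw [PySem.Dict.setdefault_of_not_contains d 0 (by simpa using h)]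
    show (d.insert p 0).insert p ((d.insert p 0).getD p 0 + 1) = _
    rw [PySem.Dict.insert_insert_self, PySem.Dict.getD_insert_self,
        PySem.Dict.getD_of_not_contains d 0 (by simpa using h)]

lemma pv_build_eq (pixel : Int) (l : List Int) :
    l.foldl (fun d other_pixel => (d.setdefault other_pixel 0).modify other_pixel 0 (· + 1))
      (PySem.Dict.mk [(pixel, (1 : Int))])
    = l.foldl (fun d p => d.insert p (d.getD p 0 + 1)) (PySem.Dict.mk [(pixel, (1 : Int))]) :=
  List.foldl_ext _ _ _ (fun d p _ => pv_step_eq d p)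

-- characterisation of A's argmax fold from a running state (cs, some m)
lemma pv_foldA_some (t : List (Int × Int)) (cs : List Int) (m M : Int)
    (hM : M = t.foldl (fun a p => max a p.2) m) :
    t.foldl pvStepA (cs, some m)
      = ((if m = M then cs else []) ++ (t.filter (fun p => p.2 == M)).map (fun p => p.1), some M) := by
  induction t generalizing cs m with
  | nil => simp at hM; simp [hM]
  | cons kv t ih =>
      obtain ⟨k, v⟩ := kv
      simp only [List.foldl_cons] at hM
      rcases lt_trichotomy m v with h | h | h
      · have hstep : pvStepA (cs, some m) (k, v) = ([k], some v) := by
          simp [pvStepA, h]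
        have hM' : M = t.foldl (fun a p => max a p.2) v := by
          simpa [max_eq_right h.le] using hM
        have hvM : v ≤ M := by
          rw [hM']; exact (PySem.List.le_foldl_max_int t (fun p => p.2) v).1
        have hmne : m ≠ M := ne_of_lt (lt_of_lt_of_le h hvM)
        rw [List.foldl_cons, hstep, ih [k] v hM']
        by_cases hv : v = M
        · simp [hv, hmne]
        · simp [hv, hmne]
      · subst h
        have hstep : pvStepA (cs, some m) (k, m) = (cs ++ [k], some m) := by
          simp [pvStepA]
        have hM' : M = t.foldl (fun a p => max a p.2) m := by
          simpa using hM
        rw [List.foldl_cons, hstep, ih (cs ++ [k]) m hM']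
        by_cases hm : m = M
        · simp [hm]
        · simp [hm]
      · have hstep : pvStepA (cs, some m) (k, v) = (cs, some m) := by
          simp [pvStepA, not_lt_of_gt h, ne_of_gt h]
        have hM' : M = t.foldl (fun a p => max a p.2) m := by
          simpa [max_eq_left h.le] using hM
        have hmM : m ≤ M := by
          rw [hM']; exact (PySem.List.le_foldl_max_int t (fun p => p.2) m).1
        have hvne : v ≠ M := ne_of_lt (lt_of_lt_of_le h hmM)
        rw [List.foldl_cons, hstep, ih cs m hM']
        simp [hvne]

lemma pv_foldA_cons (k0 v0 : Int) (t : List (Int × Int)) :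
    (((k0, v0) :: t).foldl pvStepA ([], none))
      = ((((k0, v0) :: t).filter
            (fun p => p.2 == t.foldl (fun a p => max a p.2) v0)).map (fun p => p.1),
         some (t.foldl (fun a p => max a p.2) v0)) := by
  have hstep : pvStepA ([], none) (k0, v0) = ([k0], some v0) := by simp [pvStepA]
  have hvM : v0 ≤ t.foldl (fun a p => max a p.2) v0 :=
    (PySem.List.le_foldl_max_int t (fun p => p.2) v0).1
  rw [List.foldl_cons, hstep, pv_foldA_some t [k0] v0 _ rfl]
  by_cases hv : v0 = t.foldl (fun a p => max a p.2) v0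
  · simp [← hv]
  · simp [hv]

-- sorted(xs)[0] is the running min
lemma pv_head_sorted (x : Int) (t : List Int) :
    (PySem.List.pyGet? (PySem.List.sorted (x :: t) (fun y => y) false) 0).getD 0 = t.foldl min x := by
  rcases hs : PySem.List.sorted (x :: t) (fun y => y) false with _ | ⟨hd, tl⟩
  · exact absurd ((PySem.List.sorted_eq_nil_iff _ _ _).1 hs) (by simp)
  · have hhd : ∀ y ∈ x :: t, hd ≤ y := PySem.List.key_head_sorted_le (x :: t) (fun y => y) hs
    have hmem : hd ∈ x :: t := by
      have := (PySem.List.mem_sorted (x :: t) (fun y => y) false hd).1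
      exact this (by rw [hs]; exact List.mem_cons_self)
    have h1 : t.foldl min x ≤ hd := by
      rcases List.mem_cons.1 hmem with h | h
      · rw [h]; exact (PySem.List.foldl_min_le t x).1
      · exact (PySem.List.foldl_min_le t x).2 hd h
    have h2 : hd ≤ t.foldl min x := by
      rcases PySem.List.foldl_min_mem t x with h | h
      · rw [h]; exact hhd x List.mem_cons_self
      · exact hhd _ (List.mem_cons_of_mem x h)
    rw [show hd = t.foldl min x from le_antisymm h2 h1]
    simp [PySem.List.pyGet?, PySem.List.pyIdx?]

-- A's non-center pick (len==1 or sorted head) is the running min of the tied colors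
lemma pv_A_pick (x : Int) (t' : List Int) :
    (if (x :: t').length = 1 then ((PySem.List.pyGet? (x :: t') 0).getD 0, (1 : Int))
     else ((PySem.List.pyGet? (PySem.List.sorted (x :: t') (fun y => y) false) 0).getD 0, 1))
      = (t'.foldl min x, 1) := by
  cases t' with
  | nil => simp [PySem.List.pyGet?, PySem.List.pyIdx?]
  | cons b t'' => simp [pv_head_sorted]


-- ---- B side: run structure of a sorted list, and the scan characterisation ----

lemma pv_takeRun_split (x : Int) : ∀ (t : List Int), (x :: t).Pairwise (· ≤ ·) →
    (pvTakeRun x t).1 = t.count x ∧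
    t = List.replicate (t.count x) x ++ (pvTakeRun x t).2 ∧
    ∀ y ∈ (pvTakeRun x t).2, x < y := by
  intro t
  induction t with
  | nil => intro _; simp [pvTakeRun]
  | cons y t ih =>
      intro hp
      have hxy : x ≤ y := (List.pairwise_cons.1 hp).1 y List.mem_cons_self
      have hyt : (y :: t).Pairwise (· ≤ ·) := (List.pairwise_cons.1 hp).2
      have hxt : (x :: t).Pairwise (· ≤ ·) := by
        refine List.pairwise_cons.2 ⟨fun z hz => ?_, (List.pairwise_cons.1 hyt).2⟩
        exact le_trans hxy ((List.pairwise_cons.1 hyt).1 z hz)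
      by_cases h : y = x
      · subst h
        obtain ⟨h1, h2, h3⟩ := ih hxt
        refine ⟨?_, ?_, ?_⟩
        · simp [pvTakeRun, h1]
        · simp only [List.count_cons_self, List.replicate_succ]
          rw [List.cons_append]
          simp only [pvTakeRun]
          exact congrArg _ h2
        · simpa [pvTakeRun] using h3
      · have hlt : ∀ z ∈ y :: t, x < z := by
          intro z hz
          have hyz : y ≤ z := by
            rcases List.mem_cons.1 hz with rfl | hz'
            · exact le_refl z
            · exact (List.pairwise_cons.1 hyt).1 z hz'
          exact lt_of_lt_of_le (lt_of_le_of_ne hxy (fun e => h e.symm)) hyz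
        have hc : (y :: t).count x = 0 := by
          rw [List.count_eq_zero]
          intro hmem
          exact absurd rfl (ne_of_gt (hlt x hmem))
        refine ⟨?_, ?_, ?_⟩
        · simp [pvTakeRun, h, hc]
        · simp [pvTakeRun, h, hc]
        · simpa [pvTakeRun, h] using hlt

lemma pv_foldl_max_replicate (x : Int) (f : Int → Int) :
    ∀ (m : Nat) (a : Int), (List.replicate m x).foldl (fun b c => max b (f c)) a
      = if m = 0 then a else max a (f x) := by
  intro m
  induction m with
  | zero => simp
  | succ m ih =>
      intro a
      rw [List.replicate_succ, List.foldl_cons, ih]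
      by_cases hm : m = 0
      · simp [hm]
      · simp [hm]


lemma pvScan_spec (pixel : Int) : ∀ (n : Nat) (xs : List Int), xs.length ≤ n →
    xs.Pairwise (· ≤ ·) → ∀ bc br cr,
    pvScan pixel xs (bc, br, cr) =
      (if br < xs.foldl (fun a c => max a ((xs.count c : Int))) br
         then (xs.filter (fun c => ((xs.count c : Int) == xs.foldl (fun a c => max a ((xs.count c : Int))) br))).headD bc
         else bc,
       xs.foldl (fun a c => max a ((xs.count c : Int))) br,
       if pixel ∈ xs then ((xs.count pixel : Int)) else cr) := by
  intro n
  induction n with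
  | zero =>
      intro xs hlen _ bc br cr
      have hnil : xs = [] := List.length_eq_zero_iff.1 (Nat.le_zero.1 hlen)
      subst hnil
      simp [pvScan]
  | succ n ih =>
      intro xs hlen hp bc br cr
      cases xs with
      | nil => simp [pvScan]
      | cons x t =>
        obtain ⟨hk, ht, hgt⟩ := pv_takeRun_split x t hp
        set rest := (pvTakeRun x t).2 with hrest
        set k := t.count x with hkdef
        have hrest_sub : rest.Sublist t := by
          conv_rhs => rw [ht]
          exact List.sublist_append_right _ _
        have hrest_pw : rest.Pairwise (· ≤ ·) :=
          (List.pairwise_cons.1 hp).2.sublist hrest_sub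
        have hxs_eq : x :: t = List.replicate (k + 1) x ++ rest := by
          rw [List.replicate_succ, List.cons_append]
          exact congrArg _ ht
        have hcx : (x :: t).count x = k + 1 := by
          simp [List.count_cons_self, hkdef]
        have hcount_rest : ∀ c ∈ rest, (x :: t).count c = rest.count c := by
          intro c hc
          have hxc : ¬ (x == c) = true := by
            simpa using ne_of_lt (hgt c hc)
          rw [hxs_eq, List.count_append, List.count_replicate, if_neg hxc]
          simp
        have hmem_xs : ∀ c, c ∈ x :: t ↔ (c = x ∨ c ∈ rest) := by
          intro c
          rw [hxs_eq, List.mem_append, List.mem_replicate]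
          constructor
          · rintro (⟨-, h⟩ | h)
            · exact Or.inl h
            · exact Or.inr h
          · rintro (h | h)
            · exact Or.inl ⟨Nat.succ_ne_zero k, h⟩
            · exact Or.inr h
        set run : Int := ((x :: t).count x : Int) with hrun
        have hstep : pvScan pixel (x :: t) (bc, br, cr)
            = pvScan pixel rest
                (if br < run then (x, run, if x = pixel then run else cr)
                 else (bc, br, if x = pixel then run else cr)) := by
          rw [pvScan]
          have hr1 : ((pvTakeRun x t).1 : Int) + 1 = run := by
            rw [hk, hrun, hcx]; push_cast; ring
          simp only [hr1]
          rfl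
        set bc0 : Int := if br < run then x else bc with hbc0
        set cr' : Int := if x = pixel then run else cr with hcr'
        have hinit : (if br < run then (x, run, cr') else (bc, br, cr')) = (bc0, max br run, cr') := by
          by_cases hb : br < run
          · simp [hb, hbc0, max_eq_right hb.le]
          · simp [hb, hbc0, max_eq_left (not_lt.1 hb)]
        set M := (x :: t).foldl (fun a c => max a (((x :: t).count c : Int))) br with hMdef
        have hcount_rest' : ∀ c ∈ rest,
            ((List.replicate (k + 1) x ++ rest).count c : Int) = (rest.count c : Int) := by
          intro c hc
          rw [← hxs_eq]
          exact_mod_cast hcount_rest c hc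
        have hM_eq : M = rest.foldl (fun a c => max a ((rest.count c : Int))) (max br run) := by
          rw [hMdef]
          conv_lhs => rw [hxs_eq]
          rw [List.foldl_append, pv_foldl_max_replicate, if_neg (Nat.succ_ne_zero k)]
          rw [show ((List.replicate (k + 1) x ++ rest).count x : Int) = run by rw [← hxs_eq, hrun]]
          exact PySem.List.foldl_congr_mem rest _ _ _ (fun a c hc => by rw [hcount_rest' c hc])
        have hln : rest.length ≤ n := by
          have h1 : rest.length ≤ t.length := pvTakeRun_length x t
          have h2 : t.length ≤ n := by simpa using hlen
          omega
        rw [hstep, hinit, ih rest hln hrest_pw bc0 (max br run) cr', ← hM_eq]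
        have hbr0M : max br run ≤ M := by
          rw [hM_eq]
          exact (PySem.List.le_foldl_max_int rest (fun c => (rest.count c : Int)) (max br run)).1
        -- the three components
        have hC3 : (if pixel ∈ rest then ((rest.count pixel : Int)) else cr')
            = (if pixel ∈ x :: t then (((x :: t).count pixel : Int)) else cr) := by
          by_cases hpr : pixel ∈ rest
          · rw [if_pos hpr, if_pos ((hmem_xs pixel).2 (Or.inr hpr))]
            exact_mod_cast (hcount_rest pixel hpr).symm
          · rw [if_neg hpr]
            by_cases hpx : x = pixel
            · rw [hcr', if_pos hpx, if_pos ((hmem_xs pixel).2 (Or.inl hpx.symm)), ← hpx, ← hrun]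
            · have hnm : pixel ∉ x :: t := fun h => by
                rcases (hmem_xs pixel).1 h with h' | h'
                · exact hpx h'.symm
                · exact hpr h'
              rw [hcr', if_neg hpx, if_neg hnm]
        have hC1 : (if max br run < M then (rest.filter (fun c => ((rest.count c : Int) == M))).headD bc0 else bc0)
            = (if br < M then ((x :: t).filter (fun c => (((x :: t).count c : Int) == M))).headD bc else bc) := by
          by_cases hB : max br run < M
          · have hbrM : br < M := lt_of_le_of_lt (le_max_left _ _) hB
            have hrunM : run ≠ M := fun e => absurd hB (not_lt.2 (by rw [← e]; exact le_max_right br run))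
            have hattain : ∃ c ∈ rest, (rest.count c : Int) = M := by
              have hmm := PySem.List.foldl_max_mem (rest.map (fun c => (rest.count c : Int))) (max br run)
              rw [List.foldl_map, ← hM_eq] at hmm
              rcases hmm with h | h
              · exact absurd h.symm (ne_of_lt hB)
              · obtain ⟨c, hc, hc2⟩ := List.mem_map.1 h
                exact ⟨c, hc, hc2⟩
            have hfilter_eq :
                (x :: t).filter (fun c => (((x :: t).count c : Int) == M))
                  = rest.filter (fun c => ((rest.count c : Int) == M)) := by
              conv_lhs => rw [hxs_eq]
              rw [List.filter_append, List.filter_replicate]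
              have hpx2 : ((((List.replicate (k + 1) x ++ rest).count x : Int)) == M) = false := by
                rw [← hxs_eq, ← hrun]
                simpa using hrunM
              rw [hpx2]
              simp only [Bool.false_eq_true, if_false, List.nil_append]
              exact List.filter_congr (fun c hc => by rw [hcount_rest' c hc])
            obtain ⟨c0, hc0, hc0M⟩ := hattain
            rw [if_pos hB, if_pos hbrM, hfilter_eq]
            cases hF : rest.filter (fun c => ((rest.count c : Int) == M)) with
            | nil =>
                exfalso
                have hcin : c0 ∈ rest.filter (fun c => ((rest.count c : Int) == M)) :=
                  List.mem_filter.2 ⟨hc0, by simpa using hc0M⟩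
                rw [hF] at hcin
                simp at hcin
            | cons f0 ft => simp
          · have hMeq : M = max br run := le_antisymm (not_lt.1 hB) hbr0M
            rw [if_neg hB]
            by_cases hb : br < run
            · have hMrun : M = run := by rw [hMeq, max_eq_right hb.le]
              have hbrM : br < M := by rw [hMrun]; exact hb
              rw [if_pos hbrM, hbc0, if_pos hb]
              have hhead : (x :: t).filter (fun c => (((x :: t).count c : Int) == M))
                  = x :: t.filter (fun c => (((x :: t).count c : Int) == M)) := by
                rw [List.filter_cons]
                have hpx3 : ((((x :: t).count x : Int)) == M) = true := by
                  rw [hMrun, hrun]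
                  exact beq_self_eq_true _
                rw [hpx3]
                simp
              rw [hhead]
              simp
            · have hMbr : M = br := by rw [hMeq, max_eq_left (not_lt.1 hb)]
              rw [if_neg (by rw [hMbr]; exact lt_irrefl br), hbc0, if_neg hb]
        rw [hC1, hC3]

-- ===== VERDICT (by name: the statement is the Claim_ definition above) =====
theorem refine_pixel_spec : Claim_equal_refine_pixel := by
  intro pixel around _
  unfold Spec_refine_pixel
  dsimp only [refine_pixel, refine_pixel_alt]
  rw [pv_build_eq]
  set d := around.foldl (fun d p => d.insert p (d.getD p 0 + 1)) (PySem.Dict.mk [(pixel, (1 : Int))]) with hd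
  set l := pixel :: around with hl
  -- dict facts
  have hnd : d.keys.Nodup := by
    exact PySem.Dict.nodup_keys_foldl_insert around (fun d x => d.getD x 0 + 1) _
      (by simp [PySem.Dict.keys_mk])
  have hgetD : ∀ c : Int, d.getD c 0 = (l.count c : Int) := by
    intro c
    rw [hd, PySem.Dict.getD_foldl_insert_add_one, hl]
    by_cases hc : pixel = c
    · subst hc
      simp [PySem.Dict.getD_eq_get?_getD, PySem.Dict.get?_mk_cons]
      omega
    · have : (pixel == c) = false := by simpa using hc
      simp [PySem.Dict.getD_eq_get?_getD, PySem.Dict.get?_mk_cons, this, List.count_cons]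
      rfl
  have hmemk : ∀ c : Int, c ∈ d.keys ↔ c ∈ l := by
    intro c
    rw [hd, PySem.Dict.keys_foldl_insert, PySem.Set.mem_update, PySem.Dict.keys_mk, hl]
    simp [or_comm]
  have hval : ∀ p ∈ d.items, p.2 = (l.count p.1 : Int) := by
    intro p hp
    obtain ⟨a, b⟩ := p
    have := PySem.Dict.getD_of_mem_items d hp hnd 0
    rw [hgetD] at this
    exact this.symm
  have hkeyl : ∀ p ∈ d.items, p.1 ∈ l := fun p hp =>
    (hmemk p.1).1 (PySem.Dict.mem_keys_of_mem_items d hp)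
  have hitem_of_mem : ∀ c ∈ l, (c, (l.count c : Int)) ∈ d.items := by
    intro c hc
    have hcont : d.contains c = true := (PySem.Dict.contains_iff_mem_keys d c).2 ((hmemk c).2 hc)
    rw [PySem.Dict.contains_eq_isSome_get?] at hcont
    obtain ⟨w, hw⟩ := Option.isSome_iff_exists.1 hcont
    have : d.getD c 0 = w := by rw [PySem.Dict.getD_eq_get?_getD, hw]; rfl
    rw [hgetD] at this
    rw [this]
    exact PySem.Dict.mem_items_of_get?_eq_some d hw
  -- items are nonempty (pixel is a key)
  have hpixmem : (pixel, (l.count pixel : Int)) ∈ d.items :=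
    hitem_of_mem pixel (by rw [hl]; exact List.mem_cons_self)
  rcases hi : d.items with _ | ⟨p0, t⟩
  · rw [hi] at hpixmem; simp at hpixmem
  obtain ⟨k0, v0⟩ := p0
  set MA := t.foldl (fun a p => max a p.2) v0 with hMA
  -- B side: the sorted list
  set xs := PySem.List.sorted (around ++ [pixel]) (fun x => x) false with hxs
  have hxsperm : xs.Perm l := by
    rw [hxs, hl]
    exact (PySem.List.sorted_perm (around ++ [pixel]) (fun x => x) false).trans
      (List.perm_append_singleton pixel around)
  have hcntxs : ∀ c : Int, xs.count c = l.count c := fun c => hxsperm.count_eq c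
  have hmemxs : ∀ c : Int, c ∈ xs ↔ c ∈ l := fun c => hxsperm.mem_iff
  have hpw : xs.Pairwise (· ≤ ·) := by
    have := PySem.List.sorted_pairwise (around ++ [pixel]) (fun x => x)
    rw [← hxs] at this
    exact this
  rcases hx0 : xs with _ | ⟨x0, xt⟩
  · exfalso
    have : pixel ∈ xs := (hmemxs pixel).2 (by rw [hl]; exact List.mem_cons_self)
    rw [hx0] at this; simp at this
  rw [← hx0]
  -- scan characterisation
  set MB := xs.foldl (fun a c => max a ((xs.count c : Int))) 0 with hMB
  have hMBpos : 0 < MB := by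
    have hx0mem : x0 ∈ xs := by rw [hx0]; exact List.mem_cons_self
    have h1 : (1 : Int) ≤ (xs.count x0 : Int) := by
      exact_mod_cast List.count_pos_iff.2 hx0mem
    have h2 := (PySem.List.le_foldl_max_int xs (fun c => (xs.count c : Int)) 0).2 x0 hx0mem
    omega
  have hscan : pvScan pixel xs ((PySem.List.pyGet? xs 0).getD 0, 0, 0)
      = ((xs.filter (fun c => ((xs.count c : Int) == MB))).headD x0, MB, (xs.count pixel : Int)) := by
    have hget0 : (PySem.List.pyGet? xs 0).getD 0 = x0 := by
      rw [hx0]; simp [PySem.List.pyGet?, PySem.List.pyIdx?]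
    rw [hget0, pvScan_spec pixel xs.length xs le_rfl hpw x0 0 0, ← hMB,
      if_pos hMBpos, if_pos ((hmemxs pixel).2 (by rw [hl]; exact List.mem_cons_self))]
  -- MA = MB
  have hMAattain : ∃ p ∈ d.items, p.2 = MA := by
    rcases PySem.List.foldl_max_mem (t.map (fun p : Int × Int => p.2)) v0 with h | h
    · rw [List.foldl_map] at h
      exact ⟨(k0, v0), by rw [hi]; exact List.mem_cons_self, by simp only [hMA]; exact h.symm⟩
    · rw [List.foldl_map] at h
      obtain ⟨p, hp, hp2⟩ := List.mem_map.1 h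
      exact ⟨p, by rw [hi]; exact List.mem_cons_of_mem _ hp, by rw [hMA, hp2]⟩
  have hMAeq : MA = MB := by
    apply le_antisymm
    · obtain ⟨p, hp, hp2⟩ := hMAattain
      have h1 : MA = (xs.count p.1 : Int) := by rw [← hp2, hval p hp, hcntxs]
      rw [h1]
      exact (PySem.List.le_foldl_max_int xs (fun c => (xs.count c : Int)) 0).2 p.1
        ((hmemxs p.1).2 (hkeyl p hp))
    · rcases PySem.List.foldl_max_mem (xs.map (fun c => (xs.count c : Int))) 0 with h | h
      · rw [List.foldl_map, ← hMB] at h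
        omega
      · rw [List.foldl_map, ← hMB] at h
        obtain ⟨c, hc, hc2⟩ := List.mem_map.1 h
        have hcl : c ∈ l := (hmemxs c).1 hc
        have := hitem_of_mem c hcl
        rw [hi] at this
        rw [← hc2, hcntxs]
        rcases List.mem_cons.1 this with h' | h'
        · have : (l.count c : Int) = v0 := by
            rw [Prod.ext_iff] at h'
            simpa using h'.2
          rw [this, hMA]
          exact (PySem.List.le_foldl_max_int t (fun p => p.2) v0).1
        · have := (PySem.List.le_foldl_max_int t (fun p : Int × Int => p.2) v0).2 _ h'
          rw [hMA]
          exact this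
  -- the tied-colors list of A
  rw [pv_foldA_cons, ← hMA]
  set tiedA := (((k0, v0) :: t).filter (fun p => p.2 == MA)).map (fun p => p.1) with htied
  have htieA : ∀ c : Int, c ∈ tiedA ↔ (c ∈ xs ∧ (xs.count c : Int) = MA) := by
    intro c
    rw [htied]
    constructor
    · intro h
      obtain ⟨p, hp, hp3⟩ := List.mem_map.1 h
      have hp1 : p ∈ d.items := by rw [hi]; exact (List.mem_filter.1 hp).1
      have hp2 : p.2 = MA := by simpa using (List.mem_filter.1 hp).2
      subst hp3
      exact ⟨(hmemxs p.1).2 (hkeyl p hp1), by rw [hcntxs, ← hval p hp1, hp2]⟩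
    · rintro ⟨hcx, hcM⟩
      have hcl : c ∈ l := (hmemxs c).1 hcx
      have hit := hitem_of_mem c hcl
      rw [hi] at hit
      refine List.mem_map.2 ⟨(c, (l.count c : Int)), List.mem_filter.2 ⟨hit, ?_⟩, rfl⟩
      simp only [beq_iff_eq]
      rw [← hcntxs, hcM]
  have hpixxs : pixel ∈ xs := (hmemxs pixel).2 (by rw [hl]; exact List.mem_cons_self)
  have hcond : pixel ∈ tiedA ↔ (xs.count pixel : Int) = MA :=
    ⟨fun h => ((htieA pixel).1 h).2, fun h => (htieA pixel).2 ⟨hpixxs, h⟩⟩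
  rw [hscan]
  simp only
  by_cases hc : (xs.count pixel : Int) = MA
  · rw [if_pos (hcond.2 hc), if_pos (show ((xs.count pixel : Int) = MB) by rw [← hMAeq]; exact hc)]
  · rw [if_neg (fun h => hc (hcond.1 h)), if_neg (show ¬((xs.count pixel : Int) = MB) by rw [← hMAeq]; exact hc)]
    -- both pick the least tied color
    set P := fun c : Int => ((xs.count c : Int) == MB) with hP
    have hfilmem : ∀ c : Int, c ∈ xs.filter P ↔ (c ∈ xs ∧ (xs.count c : Int) = MA) := by
      intro c
      rw [List.mem_filter, hP]
      simp [hMAeq]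
    -- A's tied list is nonempty
    rcases htA : tiedA with _ | ⟨a0, at'⟩
    · exfalso
      obtain ⟨p, hp, hp2⟩ := hMAattain
      have : p.1 ∈ tiedA := by
        rw [htied]
        refine List.mem_map.2 ⟨p, List.mem_filter.2 ⟨by rw [← hi]; exact hp, by simpa using hp2⟩, rfl⟩
      rw [htA] at this; simp at this
    -- B's filtered list is nonempty
    rcases htB : xs.filter P with _ | ⟨f0, ft⟩
    · exfalso
      obtain ⟨p, hp, hp2⟩ := hMAattain
      have : p.1 ∈ xs.filter P := (hfilmem p.1).2
        ⟨(hmemxs p.1).2 (hkeyl p hp), by rw [hcntxs, ← hval p hp, hp2]⟩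
      rw [htB] at this; simp at this
    rw [pv_A_pick]
    simp only [List.headD_cons]
    -- antisymmetry between A's running min and B's sorted-filter head
    have hm_mem : at'.foldl min a0 ∈ tiedA := by
      rw [htA]
      rcases PySem.List.foldl_min_mem at' a0 with h | h
      · rw [h]; exact List.mem_cons_self
      · exact List.mem_cons_of_mem _ h
    have hf0_mem : f0 ∈ xs.filter P := by rw [htB]; exact List.mem_cons_self
    have hf0_tied : f0 ∈ tiedA := (htieA f0).2 ((hfilmem f0).1 hf0_mem)
    have h1 : at'.foldl min a0 ≤ f0 := by
      rw [htA] at hf0_tied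
      rcases List.mem_cons.1 hf0_tied with h | h
      · rw [h]; exact (PySem.List.foldl_min_le at' a0).1
      · exact (PySem.List.foldl_min_le at' a0).2 f0 h
    have h2 : f0 ≤ at'.foldl min a0 := by
      have hmfil : at'.foldl min a0 ∈ xs.filter P :=
        (hfilmem _).2 ((htieA _).1 hm_mem)
      have hpwf : (xs.filter P).Pairwise (· ≤ ·) := hpw.filter P
      rw [htB] at hmfil hpwf
      rcases List.mem_cons.1 hmfil with h | h
      · rw [h]
      · exact (List.pairwise_cons.1 hpwf).1 _ h
    rw [le_antisymm h1 h2]
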